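-- pv_equiv track=rewrite | github.com/YashB63/Daily-Coding-Assesment | 8 Nov/Q4/Q4.py | findnumberofsuperiorelements
-- ===== SOURCE A (Python) =====
-- def findnumberofsuperiorelements(arr, n):
--     count = 1
--     max_right = arr[-1]
--
--     for i in range(n - 2, -1, -1):
--         if arr[i] > max_right:
--             count += 1
--             max_right = arr[i]
--
--     return count
-- ===== SOURCE B (Python) =====
-- def findnumberofsuperiorelements(arr, n):
--     tail = arr[-1]
--     window = arr[:n - 1] if n >= 1 else []
--     count = 1
--     for i in range(len(window)):
--         head = window[i]
--         if head > tail and all(head > window[j] for j in range(i + 1, len(window))):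
--             count += 1
--     return count
-- ===== Notes on version B (the rewrite author's own statement) =====
-- stated objective: alternative
-- what changed: Replaces A's right-to-left running-max pass with a direct nested scan that counts each window element strictly greater than the tail and than every element to its right in the window.
import Mathlib
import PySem

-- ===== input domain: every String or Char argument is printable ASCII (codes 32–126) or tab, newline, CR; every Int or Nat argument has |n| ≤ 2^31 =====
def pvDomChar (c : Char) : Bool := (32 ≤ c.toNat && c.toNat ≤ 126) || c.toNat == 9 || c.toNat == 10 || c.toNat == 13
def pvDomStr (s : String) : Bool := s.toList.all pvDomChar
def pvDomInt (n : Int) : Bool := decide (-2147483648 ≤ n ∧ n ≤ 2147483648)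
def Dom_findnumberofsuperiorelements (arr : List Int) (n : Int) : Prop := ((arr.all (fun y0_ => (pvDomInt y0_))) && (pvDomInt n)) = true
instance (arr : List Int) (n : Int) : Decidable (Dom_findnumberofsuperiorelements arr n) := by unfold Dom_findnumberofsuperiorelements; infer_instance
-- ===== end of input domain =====

-- B: instead of A's right-to-left running-max pass, a direct nested scan counting window
-- elements strictly greater than the tail and than everything to their right (alternative, O(n^2)).

-- ===== PORT A =====
def findnumberofsuperiorelements (arr : List Int) (n : Int) : Int :=
  match PySem.List.pyGet? arr (-1) with
  | none => 0   -- unreachable inside Pre_ (arr ≠ []): Python raises IndexError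
  | some maxRight0 =>
    ((PySem.List.pyRange (n - 2) (-1) (-1)).foldl
      (fun (s : Int × Int) i =>
        match PySem.List.pyGet? arr i with
        | none => s   -- unreachable inside Pre_ (n ≤ arr.length + 1): Python raises IndexError
        | some a => if a > s.2 then (s.1 + 1, a) else s)
      (1, maxRight0)).1

-- ===== PORT B =====
def findnumberofsuperiorelements_alt (arr : List Int) (n : Int) : Int :=
  match PySem.List.pyGet? arr (-1) with
  | none => 0   -- unreachable inside Pre_ (arr ≠ []): Python raises IndexError
  | some tail =>
    let window := if n ≥ 1 then PySem.List.slice arr none (some (n - 1)) else []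
    (List.range window.length).foldl
      (fun (c : Int) i =>
        let head := window.getD i 0
        if head > tail ∧ (window.drop (i + 1)).all (fun x => x < head) then c + 1 else c)
      1

-- ===== PRECONDITION & SPEC =====
-- Pre_ excludes exactly the inputs where A raises IndexError: empty arr (arr[-1]) and
-- n ≥ arr.length + 2 (arr[i] out of range inside the loop).
def Pre_findnumberofsuperiorelements (arr : List Int) (n : Int) : Prop :=
  arr ≠ [] ∧ n ≤ (arr.length : Int) + 1
instance (arr : List Int) (n : Int) : Decidable (Pre_findnumberofsuperiorelements arr n) := by
  unfold Pre_findnumberofsuperiorelements; infer_instance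
def pvWitness_findnumberofsuperiorelements : List Int × Int := ([3, 1, 4, 1, 5], 5)

def Spec_findnumberofsuperiorelements (arr : List Int) (n : Int) (out : Int) : Prop :=
  out = findnumberofsuperiorelements_alt arr n
instance (arr : List Int) (n : Int) (out : Int) : Decidable (Spec_findnumberofsuperiorelements arr n out) := by
  unfold Spec_findnumberofsuperiorelements; infer_instance

-- ===== CLAIM (what is proved, stated in full; the proofs are below) =====
def Claim_equal_findnumberofsuperiorelements : Prop := ∀ (arr : List Int) (n : Int), Dom_findnumberofsuperiorelements arr n → Pre_findnumberofsuperiorelements arr n → Spec_findnumberofsuperiorelements arr n (findnumberofsuperiorelements arr n)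

-- ===== LEMMAS AND PROOFS =====

-- the count of "superior" elements a window contributes, relative to a fixed tail value
def supCount (t : Int) : List Int → Int
  | [] => 0
  | h :: rest => (if h > t ∧ rest.all (fun x => x < h) then 1 else 0) + supCount t rest

lemma pyGet?_neg_one (xs : List Int) (h : xs ≠ []) :
    PySem.List.pyGet? xs (-1) = some (xs.getLast h) := by
  have hl : 0 < xs.length := List.length_pos_iff.mpr h
  have h1 : PySem.List.pyIdx? xs.length (-1) = some (xs.length - 1) := by
    simp [PySem.List.pyIdx?]; omega
  simp [PySem.List.pyGet?, h1, List.getLast_eq_getElem]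

lemma pyRange_down (a : Int) :
    PySem.List.pyRange a (-1) (-1)
      = (List.range (a + 1).toNat).map (fun j : Nat => a - (j : Int)) := by
  simp only [PySem.List.pyRange, if_neg (by norm_num : ¬ ((-1:Int) = 0)),
    if_neg (by norm_num : ¬ ((0:Int) < -1))]
  by_cases hb : (-1:Int) < a
  · rw [if_pos hb]
    have hm : ((a - (-1) + (- (-1)) - 1) / (- (-1))).toNat = (a + 1).toNat := by norm_num
    rw [hm]
    exact List.map_congr_left (fun k _ => by ring)
  · rw [if_neg hb]
    have h0 : (a + 1).toNat = 0 := by omega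
    simp [h0]

lemma desc_indices_succ (k : Nat) :
    (List.range (k + 1)).map (fun j : Nat => ((k + 1 : Nat) : Int) - 1 - (j : Int))
      = ((k : Nat) : Int) :: (List.range k).map (fun j : Nat => ((k : Nat) : Int) - 1 - (j : Int)) := by
  rw [List.range_succ_eq_map]
  simp [List.map_map, Function.comp]
  intro a _
  ring

lemma gt_foldr_max_iff (a t : Int) (w : List Int) :
    a > w.foldr max t ↔ a > t ∧ w.all (fun x => x < a) := by
  induction w with
  | nil => simp
  | cons x xs ih => simp [ih]; tauto

lemma foldr_step_char (t : Int) (w : List Int) (c : Int) :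
    w.foldr (fun a (s : Int × Int) => if a > s.2 then (s.1 + 1, a) else s) (c, t)
      = (c + supCount t w, w.foldr max t) := by
  induction w with
  | nil => simp [supCount]
  | cons a w ih =>
    simp only [List.foldr_cons, ih, supCount]
    by_cases hgt : a > w.foldr max t
    · rw [if_pos hgt, if_pos ((gt_foldr_max_iff a t w).mp hgt),
        max_eq_left (le_of_lt hgt)]
      simp only [Prod.mk.injEq]
      exact ⟨by ring, trivial⟩
    · rw [if_neg hgt, if_neg (fun hc => hgt ((gt_foldr_max_iff a t w).mpr ⟨hc.1, hc.2⟩)),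
        max_eq_right (le_of_not_gt hgt)]
      simp only [Prod.mk.injEq]
      exact ⟨by ring, trivial⟩

-- A's fold over the descending in-range indices is a foldr over the taken window
lemma foldl_desc_eq_foldr (arr : List Int) (k : Nat) (hk : k ≤ arr.length) (s0 : Int × Int) :
    ((List.range k).map (fun j : Nat => ((k : Nat) : Int) - 1 - (j : Int))).foldl
      (fun (s : Int × Int) i =>
        match PySem.List.pyGet? arr i with
        | none => s
        | some a => if a > s.2 then (s.1 + 1, a) else s) s0
    = (arr.take k).foldr (fun a (s : Int × Int) => if a > s.2 then (s.1 + 1, a) else s) s0 := by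
  induction k generalizing s0 with
  | zero => simp
  | succ k ih =>
    have hk' : k < arr.length := by omega
    rw [desc_indices_succ k, List.foldl_cons]
    have hget : PySem.List.pyGet? arr ((k : Nat) : Int) = some arr[k] := by
      rw [PySem.List.pyGet?_natCast, List.getElem?_eq_getElem hk']
    simp only [hget]
    rw [ih (by omega)]
    have htake : List.take (k + 1) arr = List.take k arr ++ [arr[k]] := by
      rw [List.take_add_one, List.getElem?_eq_getElem hk']; rfl
    rw [htake, List.foldr_append]
    rfl

-- B's index loop computes supCount
lemma idx_loop_eq_supCount (t : Int) (w : List Int) (c : Int) :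
    (List.range w.length).foldl
      (fun (c : Int) i =>
        if w.getD i 0 > t ∧ (w.drop (i + 1)).all (fun x => x < w.getD i 0) then c + 1 else c) c
    = c + supCount t w := by
  induction w generalizing c with
  | nil => simp [supCount]
  | cons h rest ih =>
    rw [List.length_cons, List.range_succ_eq_map, List.foldl_cons, List.foldl_map]
    simp only [List.getD_cons_zero, List.drop_succ_cons, List.getD_cons_succ, List.drop_zero]
    rw [ih]
    simp only [supCount]
    by_cases hc : h > t ∧ rest.all (fun x => x < h)
    · rw [if_pos hc, if_pos hc]; ring
    · rw [if_neg hc, if_neg hc]; ring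

-- ===== VERDICT (by name: the statement is the Claim_ definition above) =====
theorem findnumberofsuperiorelements_spec : Claim_equal_findnumberofsuperiorelements := by
  intro arr n _ hpre
  obtain ⟨hne, hlen⟩ := hpre
  unfold Spec_findnumberofsuperiorelements
  unfold findnumberofsuperiorelements findnumberofsuperiorelements_alt
  rw [pyGet?_neg_one arr hne]
  set t := arr.getLast hne with ht
  by_cases hn : n ≥ 1
  · -- window is arr.take (n-1).toNat
    set k := (n - 1).toNat with hkdef
    have hk : k ≤ arr.length := by omega
    have hslice : PySem.List.slice arr none (some (n - 1)) = arr.take k := by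
      rw [PySem.List.slice_to arr (by omega : (0:Int) ≤ n - 1)]
    simp only [if_pos hn, hslice]
    rw [idx_loop_eq_supCount t (arr.take k) 1]
    have hrange : PySem.List.pyRange (n - 2) (-1) (-1)
        = (List.range k).map (fun j : Nat => ((k : Nat) : Int) - 1 - (j : Int)) := by
      rw [pyRange_down (n - 2)]
      have h1 : (n - 2 + 1).toNat = k := by omega
      have h2 : (n - 2 : Int) = ((k : Nat) : Int) - 1 := by omega
      rw [h1, h2]
    rw [hrange, foldl_desc_eq_foldr arr k hk (1, t), foldr_step_char t (arr.take k) 1]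
  · -- empty loop on both sides
    have h0 : (n - 2 + 1).toNat = 0 := by omega
    simp [pyRange_down (n - 2), h0, if_neg hn]
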